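-- pv_equiv track=rewrite | github.com/TsunomakiUnieles/Projet-AP2-2021 | Slitherlink.py | verifie
-- ===== SOURCE A (Python) =====
-- def verifie(chaine):
--     """
--     Cette fonction vérifie si la grille est de syntaxe correcte elle renvoie
--     True sinon False.
--     :param: str
--     :return: bool
--
--     >>> verifie("3_0__ \n 230__ \n 10_3_ \n 23_31 \n 3_2 \n")
--     False
--     >>> verifie("3_0__\n230__\n10_3_\n23_31")
--     False
--     >>> verifie("3_0__\n230__\n10_3_\n23531\n")
--     False
--     >>> verifie("3_0__\n230__\n10_3_\n23_31\n3_2\n")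
--     False
--     >>> verifie("3_0__\n230__\n10_3_\n23_31\n")
--     True
--     """
--     line = 0
--     cmp = 0
--     nb_cmp_init = 0
--     for i in range(len(chaine)):
--         if (
--             chaine[i] == "_"
--             or chaine[i] == "0"
--             or chaine[i] == "1"
--             or chaine[i] == "2"
--             or chaine[i] == "3"
--         ):
--             cmp += 1
--         if chaine[i] == "\n":
--             line += 1
--             if nb_cmp_init == 0:
--                 if cmp == 0:
--                     return False
--                 else:
--                     nb_cmp_init = cmp
--             else:
--                 if nb_cmp_init != cmp:
--                     return False
--             cmp = 0
--     if chaine[len(chaine) - 1] != "\n":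
--         return False
--     return True
-- ===== SOURCE B (Python) =====
-- def verifie(chaine):
--     if chaine[-1] != "\n":
--         return False
--     width = None
--     for ligne in chaine.split("\n")[:-1]:
--         n = sum(c in "_0123" for c in ligne)
--         if width is None:
--             if n == 0:
--                 return False
--             width = n
--         elif n != width:
--             return False
--     return True
-- ===== Notes on version B (the rewrite author's own statement) =====
-- stated objective: idiomatic
-- what changed: A's single flat character scan with running counters and a zero-sentinel width is replaced by guarding the final newline first, splitting the string into lines, and comparing each line's count of valid characters (underscore and the digits 0 to 3) against the first line's width held in an Optional.
import Mathlib
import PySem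

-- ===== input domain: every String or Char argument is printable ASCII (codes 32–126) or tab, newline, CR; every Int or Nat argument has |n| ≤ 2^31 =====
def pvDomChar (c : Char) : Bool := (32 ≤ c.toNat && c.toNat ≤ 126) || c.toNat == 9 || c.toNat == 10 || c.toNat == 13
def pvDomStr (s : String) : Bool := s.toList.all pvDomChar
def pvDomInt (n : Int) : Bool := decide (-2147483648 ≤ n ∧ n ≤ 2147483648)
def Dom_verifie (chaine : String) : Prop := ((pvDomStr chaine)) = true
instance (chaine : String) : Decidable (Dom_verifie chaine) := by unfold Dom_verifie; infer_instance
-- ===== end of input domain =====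

-- B re-decomposes A's flat character scan with running counters into: guard the final newline,
-- split the string into lines, and compare each line's valid-character count to the first line's.

-- ===== PORT A =====
-- the for-loop of A: state (line, cmp, nb_cmp_init); 'return False' = false, falling out of the loop = true
def verifieLoop : List Char → Int → Int → Int → Bool
  | [], _, _, _ => true
  | c :: rest, line, cmp, nb =>
    let cmp := if c == '_' || c == '0' || c == '1' || c == '2' || c == '3' then cmp + 1 else cmp
    if c == '\n' then
      let line := line + 1
      if nb == 0 then
        if cmp == 0 then false else verifieLoop rest line 0 cmp
      else
        if nb != cmp then false else verifieLoop rest line 0 nb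
    else
      verifieLoop rest line cmp nb

def verifie (chaine : String) : Bool :=
  if verifieLoop chaine.toList 0 0 0 then
    match PySem.Str.pyGet? chaine (PySem.Str.len chaine - 1) with
    | some c => c == '\n'         -- 'if chaine[-1] != "\n": return False / return True'
    | none => false               -- Python raises IndexError here (empty string); excluded by Pre_
  else false

-- ===== PORT B =====
-- sum(c in "_0123" for c in ligne)
def bCount (ligne : List Char) : Int :=
  (ligne.map (fun c => if "_0123".toList.contains c then (1 : Int) else 0)).sum

-- the line loop of B; w is the Optional width
def bCheck : List (List Char) → Option Int → Bool
  | [], _ => true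
  | ligne :: rest, w =>
    let n := bCount ligne
    match w with
    | none => if n == 0 then false else bCheck rest (some n)
    | some v => if n != v then false else bCheck rest (some v)

def verifie_alt (chaine : String) : Bool :=
  match PySem.Str.pyGet? chaine (-1) with
  | none => false                 -- chaine[-1] raises IndexError on ""; excluded by Pre_
  | some c =>
    if c != '\n' then false
    else bCheck ((PySem.Chars.splitOn chaine.toList "\n".toList).dropLast) none

-- ===== PRECONDITION & SPEC =====
-- Pre_ excludes only the empty string, on which both A and B raise IndexError (chaine[-1]).
def Pre_verifie (chaine : String) : Prop := chaine ≠ ""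
instance (chaine : String) : Decidable (Pre_verifie chaine) := by unfold Pre_verifie; infer_instance
def pvWitness_verifie : String := "3_0__\n230__\n10_3_\n23_31\n"
def Spec_verifie (chaine : String) (out : Bool) : Prop := out = verifie_alt chaine
instance (chaine : String) (out : Bool) : Decidable (Spec_verifie chaine out) := by unfold Spec_verifie; infer_instance

-- ===== CLAIM (what is proved, stated in full; the proofs are below) =====
def Claim_equal_verifie : Prop := ∀ (chaine : String), Dom_verifie chaine → Pre_verifie chaine → Spec_verifie chaine (verifie chaine)

-- ===== LEMMAS AND PROOFS =====

-- structural model of str.split('\n') (cur = current segment, reversed)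
def mySplit (cur : List Char) : List Char → List (List Char)
  | [] => [cur.reverse]
  | c :: r => if c = '\n' then cur.reverse :: mySplit [] r else mySplit (c :: cur) r

theorem mySplit_ne_nil (cur : List Char) (cs : List Char) : mySplit cur cs ≠ [] := by
  induction cs generalizing cur with
  | nil => simp [mySplit]
  | cons c r ih => by_cases hc : c = '\n' <;> simp [mySplit, hc, ih]

theorem go_eq (fuel : Nat) : ∀ (cs cur : List Char) (acc : List (List Char)),
    cs.length ≤ fuel →
    PySem.Chars.splitOn.go ['\n'] fuel cs cur acc = acc.reverse ++ mySplit cur cs := by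
  induction fuel with
  | zero =>
    intro cs cur acc h
    have : cs = [] := by cases cs <;> simp_all
    subst this
    simp [PySem.Chars.splitOn.go, mySplit]
  | succ f ih =>
    intro cs cur acc h
    cases cs with
    | nil => simp [PySem.Chars.splitOn.go, mySplit]
    | cons c r =>
      rw [PySem.Chars.splitOn.go]
      by_cases hc : c = '\n'
      · subst hc
        simp [List.isPrefixOf, mySplit, ih r [] (cur.reverse :: acc) (by simpa using h)]
      · simp [List.isPrefixOf, hc, Ne.symm hc, mySplit, ih r (c :: cur) acc (by simpa using h)]

theorem splitOn_eq (cs : List Char) : PySem.Chars.splitOn cs ['\n'] = mySplit [] cs := by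
  simpa using go_eq (cs.length + 1) cs [] [] (by omega)

theorem bCount_nil : bCount [] = 0 := rfl

theorem bCount_append (xs ys : List Char) : bCount (xs ++ ys) = bCount xs + bCount ys := by
  simp [bCount]

-- character-level form of B's line check, with acc = valid chars already seen on the current line
def chkRest : List Char → Int → Option Int → Bool
  | [], _, _ => true
  | c :: r, acc, w =>
    if c = '\n' then
      match w with
      | none => if acc = 0 then false else chkRest r 0 (some acc)
      | some v => if acc ≠ v then false else chkRest r 0 (some v)
    else chkRest r (acc + (if "_0123".toList.contains c then 1 else 0)) w

-- A's loop computes chkRest (the line counter is dead state; nb = 0 is A's sentinel for None)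
theorem loop_eq_chkRest (cs : List Char) : ∀ (line cmp nb : Int),
    verifieLoop cs line cmp nb = chkRest cs cmp (if nb = 0 then none else some nb) := by
  induction cs with
  | nil => intro line cmp nb; rfl
  | cons c r ih =>
    intro line cmp nb
    by_cases hc : c = '\n'
    · subst hc
      have hv : ('\n' == '_' || '\n' == '0' || '\n' == '1' || '\n' == '2' || '\n' == '3') = false := by decide
      by_cases hnb : nb = 0
      · subst hnb
        by_cases hcmp : cmp = 0
        · subst hcmp; simp [verifieLoop, chkRest]
        · simp [verifieLoop, chkRest, hcmp, ih]
      · by_cases he : nb = cmp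
        · subst he
          simp [verifieLoop, chkRest, hnb, ih]
        · simp [verifieLoop, chkRest, hnb, he, Ne.symm he, bne_iff_ne]
    · have hb : (c == '\n') = false := by simpa using hc
      simp [verifieLoop, chkRest, hc, hb, ih, or_assoc]
      split_ifs <;> simp

-- B's per-line loop, generalized by the pending count of the current line
theorem bCheck_split (cs : List Char) : ∀ (cur : List Char) (w : Option Int),
    bCheck ((mySplit cur cs).dropLast) w = chkRest cs (bCount cur.reverse) w := by
  induction cs with
  | nil => intro cur w; simp [mySplit, chkRest, bCheck]
  | cons c r ih =>
    intro cur w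
    by_cases hc : c = '\n'
    · subst hc
      have hnil := mySplit_ne_nil ([] : List Char) r
      have hd : (mySplit cur ('\n' :: r)).dropLast = cur.reverse :: (mySplit [] r).dropLast := by
        simp [mySplit]
        cases hmr : mySplit [] r with
        | nil => exact absurd hmr hnil
        | cons x l => simp
      rw [hd]
      cases w with
      | none =>
        by_cases hz : bCount cur.reverse = 0
        · simp [bCheck, chkRest, hz]
        · simpa [bCheck, chkRest, hz, bne_iff_ne, bCount_nil] using ih [] (some (bCount cur.reverse))
      | some v =>
        by_cases he : bCount cur.reverse = v
        · subst he
          simpa [bCheck, chkRest, bne_iff_ne, bCount_nil] using ih [] (some (bCount cur.reverse))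
        · simp [bCheck, chkRest, he, bne_iff_ne]
    · have h1 : mySplit cur (c :: r) = mySplit (c :: cur) r := by simp [mySplit, hc]
      have h2 : bCount (c :: cur).reverse = bCount cur.reverse + bCount [c] := by
        simpa using bCount_append cur.reverse [c]
      rw [h1, ih (c :: cur) w, h2]
      simp [chkRest, hc, bCount]

-- value of chaine[-1] and chaine[len-1] agree on nonempty strings
theorem pyGet_last (l : List Char) (h : l ≠ []) :
    PySem.List.pyGet? l (-1) = PySem.List.pyGet? l ((l.length : Int) - 1) := by
  have hl : 1 ≤ l.length := by cases l <;> simp_all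
  simp only [PySem.List.pyGet?, PySem.List.pyIdx?]
  norm_num
  split_ifs
  rfl

-- ===== VERDICT (by name: the statement is the Claim_ definition above) =====
theorem verifie_spec : Claim_equal_verifie := by
  intro chaine _ hpre
  unfold Spec_verifie verifie verifie_alt
  have hsplit : (PySem.Chars.splitOn chaine.toList "\n".toList) = mySplit [] chaine.toList := by
    simpa using splitOn_eq chaine.toList
  rw [hsplit]
  have h1 : PySem.Str.pyGet? chaine (PySem.Str.len chaine - 1)
      = PySem.List.pyGet? chaine.toList ((chaine.toList.length : Int) - 1) := by
    simp [pysem]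
  have h2 : PySem.Str.pyGet? chaine (-1) = PySem.List.pyGet? chaine.toList (-1) := by
    simp [pysem]
  rw [h1, h2]
  cases hl : chaine.toList with
  | nil =>
    exact absurd (by simpa [String.ofList_toList] using congrArg String.ofList hl) hpre
  | cons x xs =>
    rw [← hl, ← pyGet_last chaine.toList (by simp [hl])]
    cases hg : PySem.List.pyGet? chaine.toList (-1) with
    | none => cases hv : verifieLoop chaine.toList 0 0 0 <;> simp
    | some c =>
      by_cases hc : c = '\n'
      · subst hc
        have hA : verifieLoop chaine.toList 0 0 0 = chkRest chaine.toList 0 none := by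
          simpa using loop_eq_chkRest chaine.toList 0 0 0
        have hB : bCheck ((mySplit [] chaine.toList).dropLast) none
            = chkRest chaine.toList 0 none := by
          simpa [bCount] using bCheck_split chaine.toList [] none
        rw [hB] at *
        cases hv : chkRest chaine.toList 0 none <;> simp [hA, hv]
      · have hb : (c != '\n') = true := by simpa [bne_iff_ne] using hc
        cases hv : verifieLoop chaine.toList 0 0 0 <;> simp [hb, hc]
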